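-- pv_equiv track=rewrite | github.com/StielChancellor/Vantage-GenAI-AdCopy-Agent | backend/app/services/ideation/critique_engine.py | _infer_captured_from_turns
-- ===== SOURCE A (Python) =====
-- _REQUIRED_TOPICS = ("audience", "hero_offer", "tone", "must_mention", "must_avoid")
--
-- _TOPIC_KEYWORDS: dict[str, tuple[str, ...]] = {
--     "audience":     ("audience", "traveller", "traveler", "guest", "for who", "for whom", "demographic", "segment"),
--     "hero_offer":   ("hero offer", "compelling element", "offer", "experience", "promotion", "deal", "incentive"),
--     "tone":         ("tone", "voice", "register", "feel", "mood of the copy", "personality"),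
--     "must_mention": ("must mention", "must-mention", "non-negotiable", "must include", "always include", "have to mention", "usps"),
--     "must_avoid":   ("must avoid", "must-avoid", "must not", "avoid", "never say", "exclude", "off-limits", "off limits"),
-- }
--
-- def _infer_topic_for_question(question: str) -> str | None:
--     """Match a question's text to a required-topic key via keyword overlap.
--     Returns the first matching topic or None."""
--     q = (question or "").lower()
--     for topic, kws in _TOPIC_KEYWORDS.items():
--         for kw in kws:
--             if kw in q:
--                 return topic
--     return None
--
-- def _infer_captured_from_turns(turns: list[dict], captured: dict) -> dict:
--     """For every answered turn, if we can identify which required topic the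
--     question was about AND the slot is still empty in `captured`, store the
--     user's answer there. Guarantees forward progress even when Gemini's
--     structured extraction misses a slot."""
--     out = dict(captured or {})
--     for t in turns:
--         q = (t.get("q") or "").strip()
--         a = (t.get("a") or "").strip()
--         if not q or not a:
--             continue
--         topic = _infer_topic_for_question(q)
--         if not topic:
--             continue
--         if not (out.get(topic) or "").strip():
--             out[topic] = a
--     # Make sure every required key exists (empty string is fine).
--     for t in _REQUIRED_TOPICS:
--         out.setdefault(t, "")
--     return out
-- ===== SOURCE B (Python) =====
-- _REQUIRED_TOPICS = ("audience", "hero_offer", "tone", "must_mention", "must_avoid")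
--
-- _TOPIC_KEYWORDS = {
--     "audience":     ("audience", "traveller", "traveler", "guest", "for who", "for whom", "demographic", "segment"),
--     "hero_offer":   ("hero offer", "compelling element", "offer", "experience", "promotion", "deal", "incentive"),
--     "tone":         ("tone", "voice", "register", "feel", "mood of the copy", "personality"),
--     "must_mention": ("must mention", "must-mention", "non-negotiable", "must include", "always include", "have to mention", "usps"),
--     "must_avoid":   ("must avoid", "must-avoid", "must not", "avoid", "never say", "exclude", "off-limits", "off limits"),
-- }
--
-- def _infer_topic_for_question(question):
--     q = (question or "").lower()
--     for topic, kws in _TOPIC_KEYWORDS.items():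
--         for kw in kws:
--             if kw in q:
--                 return topic
--     return None
--
-- def _first_hit(turns, topic):
--     """Per-topic scan: the first answered turn whose question is about `topic`,
--     returned as (turn index, topic, stripped answer), or None."""
--     for i, t in enumerate(turns):
--         q = (t.get("q") or "").strip()
--         a = (t.get("a") or "").strip()
--         if q and a and _infer_topic_for_question(q) == topic:
--             return (i, topic, a)
--     return None
--
-- def _infer_captured_from_turns(turns, captured):
--     out = dict(captured or {})
--     # One scan over the turns PER still-empty required topic.
--     hits = []
--     for topic in _REQUIRED_TOPICS:
--         if not (out.get(topic) or "").strip():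
--             h = _first_hit(turns, topic)
--             if h is not None:
--                 hits.append(h)
--     # Replay the winning hits in turn order so new keys appear as they did in the dialogue.
--     for _, topic, a in sorted(hits, key=lambda h: h[0]):
--         out[topic] = a
--     for topic in _REQUIRED_TOPICS:
--         out.setdefault(topic, "")
--     return out
-- ===== Notes on version B (the rewrite author's own statement) =====
-- stated objective: alternative
-- what changed: B inverts the traversal: instead of A's single stateful pass over the turns, it loops over the five required topics, runs one scan over the turns per still-empty topic to find that topic's first answered question, then replays the collected hits sorted by turn index before filling defaults.
import Mathlib
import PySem

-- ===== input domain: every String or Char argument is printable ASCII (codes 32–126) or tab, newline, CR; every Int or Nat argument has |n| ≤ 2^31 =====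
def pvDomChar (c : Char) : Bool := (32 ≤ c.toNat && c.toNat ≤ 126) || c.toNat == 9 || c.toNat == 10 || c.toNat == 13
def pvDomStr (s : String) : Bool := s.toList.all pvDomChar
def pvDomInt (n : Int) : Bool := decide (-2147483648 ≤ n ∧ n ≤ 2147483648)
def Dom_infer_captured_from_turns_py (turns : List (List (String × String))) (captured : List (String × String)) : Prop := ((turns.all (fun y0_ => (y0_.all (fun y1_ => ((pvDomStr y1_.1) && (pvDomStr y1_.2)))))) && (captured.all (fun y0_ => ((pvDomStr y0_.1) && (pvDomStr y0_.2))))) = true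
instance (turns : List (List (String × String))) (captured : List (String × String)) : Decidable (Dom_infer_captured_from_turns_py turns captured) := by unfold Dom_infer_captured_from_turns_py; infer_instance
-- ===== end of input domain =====

-- B inverts the traversal: one scan over the turns per still-empty required topic (first answered
-- question about that topic), hits replayed sorted by turn index, instead of A's single stateful
-- pass over the turns. Objective: alternative decomposition; same exact result.

-- ===== PORT A =====
def requiredTopicsPy : List String := ["audience", "hero_offer", "tone", "must_mention", "must_avoid"]

def topicKeywordsPy : List (String × List String) :=
  [ ("audience",     ["audience", "traveller", "traveler", "guest", "for who", "for whom", "demographic", "segment"]),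
    ("hero_offer",   ["hero offer", "compelling element", "offer", "experience", "promotion", "deal", "incentive"]),
    ("tone",         ["tone", "voice", "register", "feel", "mood of the copy", "personality"]),
    ("must_mention", ["must mention", "must-mention", "non-negotiable", "must include", "always include", "have to mention", "usps"]),
    ("must_avoid",   ["must avoid", "must-avoid", "must not", "avoid", "never say", "exclude", "off-limits", "off limits"]) ]

-- shared module helper `_infer_topic_for_question`: nested first-match loops over the keyword table
def inferTopicLoop (q : String) : List (String × List String) → Option String
  | [] => none
  | (topic, kws) :: rest =>
      if kws.any (fun kw => PySem.Str.isIn kw q) then some topic else inferTopicLoop q rest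

def infer_topic_for_question_py (question : String) : Option String :=
  inferTopicLoop (PySem.Str.lower question) topicKeywordsPy

-- one iteration of A's `for t in turns:` loop body
def pyStepA (out : PySem.Dict String String) (t : List (String × String)) : PySem.Dict String String :=
  if PySem.Str.strip (((PySem.Dict.ofList t).get? "q").getD "") = "" ∨
     PySem.Str.strip (((PySem.Dict.ofList t).get? "a").getD "") = "" then out
  else
    match infer_topic_for_question_py (PySem.Str.strip (((PySem.Dict.ofList t).get? "q").getD "")) with
    | none => out
    | some topic =>
        if PySem.Str.strip ((out.get? topic).getD "") = "" then
          out.insert topic (PySem.Str.strip (((PySem.Dict.ofList t).get? "a").getD ""))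
        else out

def infer_captured_from_turns_py (turns : List (List (String × String))) (captured : List (String × String)) : List (String × String) :=
  (requiredTopicsPy.foldl (fun o tp => o.setdefault tp "")
    (turns.foldl pyStepA (PySem.Dict.ofList captured))).items

-- ===== PORT B =====
-- B's helper `_first_hit`: scan enumerate(turns) for the first answered turn about `topic`
def firstHitAlt (turns : List (List (String × String))) (topic : String) : Option (Int × String × String) :=
  (PySem.List.enumerate turns 0).findSome? (fun it =>
    if PySem.Str.strip (((PySem.Dict.ofList it.2).get? "q").getD "") ≠ "" ∧
       PySem.Str.strip (((PySem.Dict.ofList it.2).get? "a").getD "") ≠ "" ∧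
       infer_topic_for_question_py (PySem.Str.strip (((PySem.Dict.ofList it.2).get? "q").getD "")) = some topic
    then some (it.1, topic, PySem.Str.strip (((PySem.Dict.ofList it.2).get? "a").getD ""))
    else none)

def infer_captured_from_turns_py_alt (turns : List (List (String × String))) (captured : List (String × String)) : List (String × String) :=
  let out0 := PySem.Dict.ofList captured
  let hits := requiredTopicsPy.foldl (fun acc tp =>
      if PySem.Str.strip ((out0.get? tp).getD "") = "" then
        match firstHitAlt turns tp with
        | some h => acc ++ [h]
        | none => acc
      else acc) []
  let out1 := (PySem.List.sorted hits (fun h => h.1) false).foldl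
      (fun o h => o.insert h.2.1 h.2.2) out0
  (requiredTopicsPy.foldl (fun o tp => o.setdefault tp "") out1).items

-- ===== PRECONDITION & SPEC =====
def Spec_infer_captured_from_turns_py (turns : List (List (String × String))) (captured : List (String × String)) (out : List (String × String)) : Prop := out = infer_captured_from_turns_py_alt turns captured
instance (turns : List (List (String × String))) (captured : List (String × String)) (out : List (String × String)) : Decidable (Spec_infer_captured_from_turns_py turns captured out) := by unfold Spec_infer_captured_from_turns_py; infer_instance

-- ===== CLAIM (what is proved, stated in full; the proofs are below) =====
def Claim_equal_infer_captured_from_turns_py : Prop := ∀ (turns : List (List (String × String))) (captured : List (String × String)), Dom_infer_captured_from_turns_py turns captured → Spec_infer_captured_from_turns_py turns captured (infer_captured_from_turns_py turns captured)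

-- ===== LEMMAS AND PROOFS =====

-- the data one turn contributes: (topic, stripped answer), or none if the turn is skipped
def parseTurn (t : List (String × String)) : Option (String × String) :=
  if PySem.Str.strip (((PySem.Dict.ofList t).get? "q").getD "") = "" ∨
     PySem.Str.strip (((PySem.Dict.ofList t).get? "a").getD "") = "" then none
  else (infer_topic_for_question_py (PySem.Str.strip (((PySem.Dict.ofList t).get? "q").getD ""))).map
         (fun topic => (topic, PySem.Str.strip (((PySem.Dict.ofList t).get? "a").getD "")))

def mergeStep (o : PySem.Dict String String) (p : String × String) : PySem.Dict String String :=
  if PySem.Str.strip ((o.get? p.1).getD "") = "" then o.insert p.1 p.2 else o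

-- the indexed contributions, in turn order
def QOf (s : Int) (turns : List (List (String × String))) : List (Int × String × String) :=
  (PySem.List.enumerate turns s).filterMap
    (fun it => (parseTurn it.2).map (fun p => (it.1, p.1, p.2)))

-- first-write filter: keeps the first triple of each still-blank topic
def fwL (b : String → Bool) : List (Int × String × String) → List (Int × String × String)
  | [] => []
  | x :: xs => if b x.2.1 then x :: fwL (fun tp => if tp = x.2.1 then false else b tp) xs
               else fwL b xs

theorem foldl_funext {α β : Type} (f g : α → β → α) (a : α) (l : List β)
    (h : ∀ acc x, f acc x = g acc x) : l.foldl f a = l.foldl g a := by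
  induction l generalizing a with
  | nil => rfl
  | cons x xs ih => simp only [List.foldl_cons, h a x, ih]

theorem stepA_eq (out : PySem.Dict String String) (t : List (String × String)) :
    pyStepA out t = match parseTurn t with | none => out | some p => mergeStep out p := by
  unfold pyStepA parseTurn mergeStep
  by_cases h : PySem.Str.strip (((PySem.Dict.ofList t).get? "q").getD "") = "" ∨
               PySem.Str.strip (((PySem.Dict.ofList t).get? "a").getD "") = ""
  · simp [h]
  · cases htop : infer_topic_for_question_py
        (PySem.Str.strip (((PySem.Dict.ofList t).get? "q").getD "")) <;> simp [h]

-- A's turn loop is the merge-fold over the parsed pairs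
theorem aFold_eq (turns : List (List (String × String))) (o : PySem.Dict String String) :
    turns.foldl pyStepA o = (turns.filterMap parseTurn).foldl mergeStep o := by
  rw [List.foldl_filterMap]
  apply foldl_funext
  intro acc t
  rw [stepA_eq]
  cases parseTurn t <;> rfl

-- Chars.strip is idempotent
theorem dropWhile_idem {α : Type} (p : α → Bool) (l : List α) :
    (l.dropWhile p).dropWhile p = l.dropWhile p := by
  induction l with
  | nil => rfl
  | cons x xs ih =>
      by_cases h : p x = true <;> simp [h, ih]

theorem lstrip_of_prefix_lstripped (u t : List Char) (h : u <+: t)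
    (ht : t.dropWhile PySem.Chars.isspace = t) :
    u.dropWhile PySem.Chars.isspace = u := by
  cases u with
  | nil => rfl
  | cons x xs =>
      have hx : PySem.Chars.isspace x = false := by
        obtain ⟨rest, hrest⟩ := h
        cases t with
        | nil => simp at hrest
        | cons y ys =>
            have hcons : x :: (xs ++ rest) = y :: ys := by simpa using hrest
            injection hcons with h1 _
            subst h1
            by_contra hc
            have hx' : PySem.Chars.isspace x = true := by
              cases hh : PySem.Chars.isspace x
              · exact absurd hh hc
              · rfl
            rw [List.dropWhile_cons, if_pos hx'] at ht
            have hlen : (List.dropWhile PySem.Chars.isspace ys).length = ys.length + 1 :=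
              congrArg List.length ht
            have hle := List.length_dropWhile_le PySem.Chars.isspace ys
            omega
      simp [hx]

theorem chars_strip_idem (s : List Char) :
    PySem.Chars.strip (PySem.Chars.strip s) = PySem.Chars.strip s := by
  unfold PySem.Chars.strip PySem.Chars.rstrip PySem.Chars.lstrip
  set t := List.dropWhile PySem.Chars.isspace s with ht
  have htt : t.dropWhile PySem.Chars.isspace = t := by rw [ht]; exact dropWhile_idem _ _
  have hpre : (List.dropWhile PySem.Chars.isspace t.reverse).reverse <+: t := by
    obtain ⟨pre, hpre⟩ := List.dropWhile_suffix (l := t.reverse) PySem.Chars.isspace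
    exact ⟨pre.reverse, by rw [← List.reverse_append, hpre, List.reverse_reverse]⟩
  rw [lstrip_of_prefix_lstripped _ t hpre htt]
  rw [List.reverse_reverse, dropWhile_idem]

theorem str_strip_idem (s : String) :
    PySem.Str.strip (PySem.Str.strip s) = PySem.Str.strip s := by
  unfold PySem.Str.strip
  rw [String.toList_ofList, chars_strip_idem]

-- every parsed pair has an already-stripped, nonempty answer
theorem parse_stripped (t : List (String × String)) (p : String × String)
    (h : parseTurn t = some p) : PySem.Str.strip p.2 = p.2 ∧ p.2 ≠ "" := by
  unfold parseTurn at h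
  by_cases hqa : PySem.Str.strip (((PySem.Dict.ofList t).get? "q").getD "") = "" ∨
                 PySem.Str.strip (((PySem.Dict.ofList t).get? "a").getD "") = ""
  · simp [hqa] at h
  · rw [if_neg hqa] at h
    cases htop : infer_topic_for_question_py
        (PySem.Str.strip (((PySem.Dict.ofList t).get? "q").getD "")) with
    | none => rw [htop] at h; simp at h
    | some topic =>
        rw [htop] at h
        simp only [Option.map_some] at h
        injection h with h2
        rw [← h2]
        exact ⟨str_strip_idem _, fun hc => hqa (Or.inr hc)⟩

-- inferred topics are keys of the keyword table, i.e. required topics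
theorem inferTopicLoop_mem (q : String) (l : List (String × List String)) (tp : String)
    (h : inferTopicLoop q l = some tp) : tp ∈ l.map Prod.fst := by
  induction l with
  | nil => exact absurd h (by simp [inferTopicLoop])
  | cons p rest ih =>
      cases p with
      | mk topic kws =>
          unfold inferTopicLoop at h
          by_cases hc : (kws.any fun kw => PySem.Str.isIn kw q) = true
          · rw [if_pos hc] at h
            injection h with h1
            simp [h1]
          · rw [if_neg hc] at h
            simp [ih h]

theorem parse_topic_required (t : List (String × String)) (p : String × String)
    (h : parseTurn t = some p) : p.1 ∈ requiredTopicsPy := by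
  unfold parseTurn at h
  by_cases hqa : PySem.Str.strip (((PySem.Dict.ofList t).get? "q").getD "") = "" ∨
                 PySem.Str.strip (((PySem.Dict.ofList t).get? "a").getD "") = ""
  · simp [hqa] at h
  · rw [if_neg hqa] at h
    cases htop : infer_topic_for_question_py
        (PySem.Str.strip (((PySem.Dict.ofList t).get? "q").getD "")) with
    | none => rw [htop] at h; simp at h
    | some topic =>
        rw [htop] at h
        simp only [Option.map_some] at h
        injection h with h2
        have hmem := inferTopicLoop_mem _ _ _ htop
        have hmap : topicKeywordsPy.map Prod.fst = requiredTopicsPy := rfl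
        rw [hmap] at hmem
        rw [← h2]
        exact hmem

-- the unindexed projection of QOf is A's parsed-pairs list
theorem QOf_map (turns : List (List (String × String))) (s : Int) :
    (QOf s turns).map (fun x => (x.2.1, x.2.2)) = turns.filterMap parseTurn := by
  induction turns generalizing s with
  | nil => rfl
  | cons t ts ih =>
      unfold QOf
      rw [PySem.List.enumerate_cons, List.filterMap_cons]
      cases hp : parseTurn t with
      | none => simpa [hp] using ih (s + 1)
      | some p => simpa [hp] using ih (s + 1)

-- elements of QOf carry parsed data
theorem QOf_mem (turns : List (List (String × String))) (s : Int)
    (x : Int × String × String) (hx : x ∈ QOf s turns) :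
    ∃ t, parseTurn t = some (x.2.1, x.2.2) := by
  unfold QOf at hx
  obtain ⟨it, _, hit⟩ := List.mem_filterMap.mp hx
  cases hpt : parseTurn it.2 with
  | none => rw [hpt] at hit; simp at hit
  | some p =>
      rw [hpt] at hit
      simp only [Option.map_some, Option.some.injEq] at hit
      exact ⟨it.2, by rw [hpt, ← hit]⟩

-- QOf indices are strictly increasing
theorem QOf_pairwise (turns : List (List (String × String))) (s : Int) :
    (QOf s turns).Pairwise (fun x y => x.1 < y.1) := by
  unfold QOf
  apply List.pairwise_filterMap.mpr
  apply (PySem.List.pairwise_lt_enumerate turns s).imp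
  intro a b hab x hx y hy
  cases hpa : parseTurn a.2 with
  | none => rw [hpa] at hx; simp at hx
  | some p =>
      cases hpb : parseTurn b.2 with
      | none => rw [hpb] at hy; simp at hy
      | some p' =>
          rw [hpa] at hx; rw [hpb] at hy
          simp only [Option.map_some, Option.some.injEq] at hx hy
          rw [← hx, ← hy]
          exact hab

-- `_first_hit` is `find?` on the contributions list
theorem bodyEq (i : Int) (t : List (String × String)) (tp : String) :
    (if PySem.Str.strip (((PySem.Dict.ofList t).get? "q").getD "") ≠ "" ∧
        PySem.Str.strip (((PySem.Dict.ofList t).get? "a").getD "") ≠ "" ∧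
        infer_topic_for_question_py (PySem.Str.strip (((PySem.Dict.ofList t).get? "q").getD "")) = some tp
     then some (i, tp, PySem.Str.strip (((PySem.Dict.ofList t).get? "a").getD ""))
     else none)
    = (parseTurn t).bind (fun p => if p.1 = tp then some (i, p.1, p.2) else none) := by
  unfold parseTurn
  by_cases hq : PySem.Str.strip (((PySem.Dict.ofList t).get? "q").getD "") = ""
  · simp [hq]
  · by_cases ha : PySem.Str.strip (((PySem.Dict.ofList t).get? "a").getD "") = ""
    · simp [hq, ha]
    · cases htop : infer_topic_for_question_py
          (PySem.Str.strip (((PySem.Dict.ofList t).get? "q").getD "")) with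
      | none => simp [hq, ha]
      | some tp0 =>
          by_cases he : tp0 = tp
          · subst he; simp [hq, ha]
          · simp [hq, ha, he]

theorem findSome_find (l : List (Int × List (String × String))) (tp : String) :
    l.findSome? (fun it => (parseTurn it.2).bind
        (fun p => if p.1 = tp then some (it.1, p.1, p.2) else none))
    = (l.filterMap (fun it => (parseTurn it.2).map (fun p => (it.1, p.1, p.2)))).find?
        (fun x => x.2.1 == tp) := by
  induction l with
  | nil => rfl
  | cons h hs ih =>
      rw [List.findSome?_cons, List.filterMap_cons]
      cases hp : parseTurn h.2 with
      | none => simpa [hp] using ih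
      | some p =>
          by_cases he : p.1 = tp
          · simp [he]
          · simp only [Option.bind_some, if_neg he, Option.map_some, List.find?_cons,
              beq_false_of_ne he]
            exact ih

theorem firstHit_eq_find (turns : List (List (String × String))) (tp : String) :
    firstHitAlt turns tp = (QOf 0 turns).find? (fun x => x.2.1 == tp) := by
  have hfun : (fun (it : Int × List (String × String)) =>
      if PySem.Str.strip (((PySem.Dict.ofList it.2).get? "q").getD "") ≠ "" ∧
         PySem.Str.strip (((PySem.Dict.ofList it.2).get? "a").getD "") ≠ "" ∧
         infer_topic_for_question_py (PySem.Str.strip (((PySem.Dict.ofList it.2).get? "q").getD "")) = some tp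
      then some (it.1, tp, PySem.Str.strip (((PySem.Dict.ofList it.2).get? "a").getD ""))
      else none)
      = (fun (it : Int × List (String × String)) => (parseTurn it.2).bind
          (fun p => if p.1 = tp then some (it.1, p.1, p.2) else none)) :=
    funext (fun it => bodyEq it.1 it.2 tp)
  unfold firstHitAlt QOf
  rw [hfun, findSome_find]

-- fwL is a sublist, hence inherits the strict index order
theorem fwL_sublist (b : String → Bool) (l : List (Int × String × String)) :
    (fwL b l).Sublist l := by
  induction l generalizing b with
  | nil => simp [fwL]
  | cons x xs ih =>
      unfold fwL
      by_cases hb : b x.2.1 = true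
      · rw [if_pos hb]; exact List.Sublist.cons₂ x (ih _)
      · rw [if_neg hb]; exact List.Sublist.cons x (ih b)

-- membership in fwL: exactly the first occurrence of each still-blank topic
theorem fwL_mem (l : List (Int × String × String)) (b : String → Bool)
    (x : Int × String × String) :
    x ∈ fwL b l ↔ (b x.2.1 = true ∧ l.find? (fun y => y.2.1 == x.2.1) = some x) := by
  induction l generalizing b with
  | nil => simp [fwL]
  | cons h hs ih =>
      unfold fwL
      by_cases hb : b h.2.1 = true
      · rw [if_pos hb]
        constructor
        · intro hx
          rcases List.mem_cons.mp hx with hx1 | hx2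
          · subst hx1
            exact ⟨hb, by simp⟩
          · obtain ⟨hbx, hfind⟩ := (ih _).mp hx2
            have hne : x.2.1 ≠ h.2.1 := by
              intro hc
              rw [hc] at hbx; simp at hbx
            refine ⟨?_, ?_⟩
            · have : (if x.2.1 = h.2.1 then false else b x.2.1) = true := hbx
              rwa [if_neg hne] at this
            · rw [List.find?_cons, beq_false_of_ne (fun hc => hne hc.symm)]
              exact hfind
        · rintro ⟨hbx, hfind⟩
          rw [List.find?_cons] at hfind
          by_cases he : h.2.1 = x.2.1
          · rw [beq_iff_eq.mpr he] at hfind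
            simp only [Option.some.injEq] at hfind
            rw [← hfind]
            exact List.mem_cons_self
          · rw [beq_false_of_ne he] at hfind
            apply List.mem_cons_of_mem
            apply (ih _).mpr
            refine ⟨?_, hfind⟩
            rw [if_neg (fun hc => he hc.symm)]
            exact hbx
      · rw [if_neg hb]
        constructor
        · intro hx
          obtain ⟨hbx, hfind⟩ := (ih b).mp hx
          have hne : h.2.1 ≠ x.2.1 := by
            intro hc
            rw [← hc] at hbx; exact hb hbx
          rw [List.find?_cons, beq_false_of_ne hne]
          exact ⟨hbx, hfind⟩
        · rintro ⟨hbx, hfind⟩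
          rw [List.find?_cons] at hfind
          by_cases he : h.2.1 = x.2.1
          · rw [← he] at hbx; exact absurd hbx hb
          · rw [beq_false_of_ne he] at hfind
            exact (ih b).mpr ⟨hbx, hfind⟩

-- merging in turn order = inserting exactly the first hit of each still-blank topic
theorem merge_eq_fwL (l : List (Int × String × String)) (o : PySem.Dict String String)
    (b : String → Bool)
    (hb : ∀ tp, b tp = true ↔ PySem.Str.strip ((o.get? tp).getD "") = "")
    (hl : ∀ x ∈ l, PySem.Str.strip x.2.2 = x.2.2 ∧ x.2.2 ≠ "") :
    (l.map (fun x => (x.2.1, x.2.2))).foldl mergeStep o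
      = (fwL b l).foldl (fun o x => o.insert x.2.1 x.2.2) o := by
  induction l generalizing o b with
  | nil => rfl
  | cons x xs ih =>
      have hx := hl x List.mem_cons_self
      unfold fwL
      rw [List.map_cons, List.foldl_cons]
      by_cases hbx : b x.2.1 = true
      · rw [if_pos hbx]
        have hm : mergeStep o (x.2.1, x.2.2) = o.insert x.2.1 x.2.2 := by
          unfold mergeStep
          rw [if_pos ((hb x.2.1).mp hbx)]
        rw [hm, List.foldl_cons]
        apply ih
        · intro tp
          by_cases he : tp = x.2.1
          · subst he
            rw [if_pos rfl]
            rw [PySem.Dict.get?_insert_self]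
            simp only [Option.getD_some]
            constructor
            · intro hc; exact absurd hc (Bool.false_ne_true)
            · intro hc; rw [hx.1] at hc; exact absurd hc hx.2
          · rw [if_neg he, PySem.Dict.get?_insert_of_ne o x.2.2 he]
            exact hb tp
        · exact fun y hy => hl y (List.mem_cons_of_mem x hy)
      · rw [if_neg hbx]
        have hm : mergeStep o (x.2.1, x.2.2) = o := by
          unfold mergeStep
          rw [if_neg (fun hc => hbx ((hb x.2.1).mpr hc))]
        rw [hm]
        exact ih o b hb (fun y hy => hl y (List.mem_cons_of_mem x hy))

-- an append-if-some fold step, and: such a fold is a filterMap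
def stepOpt {α β : Type} (f : α → Option β) (acc : List β) (x : α) : List β :=
  match f x with
  | some y => acc ++ [y]
  | none => acc

theorem foldl_append_opt {α β : Type} (f : α → Option β) (l : List α) (acc : List β) :
    l.foldl (stepOpt f) acc = acc ++ l.filterMap f := by
  induction l generalizing acc with
  | nil => simp
  | cons x xs ih =>
      rw [List.foldl_cons, List.filterMap_cons]
      cases hf : f x with
      | none =>
          have h1 : stepOpt f acc x = acc := by unfold stepOpt; rw [hf]
          rw [h1, ih]
      | some y =>
          have h1 : stepOpt f acc x = acc ++ [y] := by unfold stepOpt; rw [hf]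
          rw [h1, ih]
          simp

-- value produced for a topic by B's hit filter carries that topic
theorem hf_topic (turns : List (List (String × String))) (out0 : PySem.Dict String String)
    (tp : String) (x : Int × String × String)
    (h : (if PySem.Str.strip ((out0.get? tp).getD "") = "" then firstHitAlt turns tp else none)
          = some x) :
    x.2.1 = tp ∧ PySem.Str.strip ((out0.get? tp).getD "") = ""
      ∧ (QOf 0 turns).find? (fun y => y.2.1 == tp) = some x := by
  by_cases hc : PySem.Str.strip ((out0.get? tp).getD "") = ""
  · rw [if_pos hc] at h
    have hfind : (QOf 0 turns).find? (fun y => y.2.1 == tp) = some x := by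
      rw [← h]
      exact (firstHit_eq_find turns tp).symm
    have hx := List.find?_some hfind
    exact ⟨beq_iff_eq.mp hx, hc, hfind⟩
  · rw [if_neg hc] at h
    exact absurd h (by simp)

-- A's merged dict equals B's sorted-hits insert fold
theorem inner_eq (turns : List (List (String × String))) (captured : List (String × String)) :
    turns.foldl pyStepA (PySem.Dict.ofList captured)
      = (PySem.List.sorted
          (requiredTopicsPy.foldl (fun acc tp =>
            if PySem.Str.strip (((PySem.Dict.ofList captured).get? tp).getD "") = "" then
              match firstHitAlt turns tp with
              | some h => acc ++ [h]
              | none => acc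
            else acc) [])
          (fun h => h.1) false).foldl
          (fun o h => o.insert h.2.1 h.2.2) (PySem.Dict.ofList captured) := by
  have hfold : (requiredTopicsPy.foldl (fun acc tp =>
      if PySem.Str.strip (((PySem.Dict.ofList captured).get? tp).getD "") = "" then
        match firstHitAlt turns tp with
        | some h => acc ++ [h]
        | none => acc
      else acc) [])
      = requiredTopicsPy.filterMap (fun tp =>
          if PySem.Str.strip (((PySem.Dict.ofList captured).get? tp).getD "") = "" then
            firstHitAlt turns tp else none) := by
    have hpt : ∀ (acc : List (Int × String × String)) (tp : String),
        (if PySem.Str.strip (((PySem.Dict.ofList captured).get? tp).getD "") = "" then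
           match firstHitAlt turns tp with
           | some h => acc ++ [h]
           | none => acc
         else acc)
        = stepOpt (fun tp =>
             if PySem.Str.strip (((PySem.Dict.ofList captured).get? tp).getD "") = "" then
               firstHitAlt turns tp else none) acc tp := by
      intro acc tp
      unfold stepOpt
      split_ifs with h <;> simp [h]
      cases firstHitAlt turns tp <;> rfl
    rw [foldl_funext _ _ _ _ hpt]
    exact (foldl_append_opt _ _ []).trans (by simp)
  rw [hfold]
  -- names
  set out0 := PySem.Dict.ofList captured with hout0
  set hitsFM := requiredTopicsPy.filterMap (fun tp =>
      if PySem.Str.strip ((out0.get? tp).getD "") = "" then firstHitAlt turns tp else none)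
    with hhitsFM
  set b : String → Bool := fun tp => decide (PySem.Str.strip ((out0.get? tp).getD "") = "")
    with hbdef
  -- membership in hitsFM
  have hmem : ∀ x, x ∈ hitsFM
      ↔ (b x.2.1 = true ∧ (QOf 0 turns).find? (fun y => y.2.1 == x.2.1) = some x) := by
    intro x
    rw [hhitsFM]
    constructor
    · intro hx
      obtain ⟨tp, _, heq⟩ := List.mem_filterMap.mp hx
      obtain ⟨h1, h2, h3⟩ := hf_topic turns out0 tp x heq
      subst h1
      exact ⟨by rw [hbdef]; exact decide_eq_true h2, h3⟩
    · rintro ⟨hbx, hfind⟩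
      apply List.mem_filterMap.mpr
      refine ⟨x.2.1, ?_, ?_⟩
      · have hxQ : x ∈ QOf 0 turns := List.mem_of_find?_eq_some hfind
        obtain ⟨t, ht⟩ := QOf_mem turns 0 x hxQ
        exact parse_topic_required t _ ht
      · have hc : PySem.Str.strip ((out0.get? x.2.1).getD "") = "" := of_decide_eq_true hbx
        rw [if_pos hc]
        rw [firstHit_eq_find turns x.2.1]
        exact hfind
  -- the index order of the contributions
  have hQpw := QOf_pairwise turns 0
  -- fwL is strictly index-sorted
  have hfwpw : (fwL b (QOf 0 turns)).Pairwise (fun x y => x.1 < y.1) :=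
    hQpw.sublist (fwL_sublist b (QOf 0 turns))
  -- nodup on both sides
  have hfwnd : (fwL b (QOf 0 turns)).Nodup := by
    refine hfwpw.imp ?_
    intro x y hlt heq
    rw [heq] at hlt
    exact lt_irrefl _ hlt
  have hndreq : requiredTopicsPy.Pairwise (fun a b => a ≠ b) := by decide
  have hhitsnd : hitsFM.Nodup := by
    rw [hhitsFM]
    apply List.pairwise_filterMap.mpr
    apply hndreq.imp_of_mem
    intro a c _ _ hac x hx y hy
    have hxa := (hf_topic turns out0 a x hx).1
    have hyc := (hf_topic turns out0 c y hy).1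
    intro he
    exact hac (by rw [← hxa, ← hyc, he])
  -- perm between the two winning-hit lists
  have hperm : (fwL b (QOf 0 turns)).Perm hitsFM := by
    apply (List.perm_ext_iff_of_nodup hfwnd hhitsnd).mpr
    intro x
    rw [fwL_mem, hmem]
  -- sorting B's hits by index yields A's write order
  have hsorted : PySem.List.sorted hitsFM (fun h => h.1) false = fwL b (QOf 0 turns) :=
    PySem.List.sorted_eq_of_perm_of_pairwise_lt _ _ _ hperm hfwpw
  rw [hsorted]
  -- A's loop is the same insert fold
  rw [aFold_eq, ← QOf_map turns 0]
  apply merge_eq_fwL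
  · intro tp
    rw [hbdef]
    exact decide_eq_true_iff
  · intro x hx
    obtain ⟨t, ht⟩ := QOf_mem turns 0 x hx
    exact parse_stripped t _ ht

-- ===== VERDICT (by name: the statement is the Claim_ definition above) =====
theorem infer_captured_from_turns_py_spec : Claim_equal_infer_captured_from_turns_py := by
  intro turns captured _
  unfold Spec_infer_captured_from_turns_py infer_captured_from_turns_py
    infer_captured_from_turns_py_alt
  exact congrArg (fun d => (requiredTopicsPy.foldl (fun o tp => o.setdefault tp "") d).items)
    (inner_eq turns captured)
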